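-- pv_equiv track=rewrite | github.com/SJShaw/mibig-json | extract_refseq_info.py | get_refseq_base
-- ===== SOURCE A (Python) =====
-- def get_refseq_base(comment: str) -> str:
--     raw_sentences = [raw.strip() for raw in comment.replace("\n", " ").split(".")]
--     sentences = raw_sentences[:1]
--     for i, raw in enumerate(raw_sentences[1:]):
--         if raw.isdigit():
--             sentences[-1] = f"{sentences[-1]}.{raw}"
--         else:
--             sentences.append(raw)
--     for sentence in sentences:
--         if "reference sequence is identical to" in sentence or "reference sequence was derived from" in sentence:
--             result = sentence.rsplit()[-1]
--             return result
--     raise ValueError(f"couldn't get refseq base accession from: {comment}")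
-- ===== SOURCE B (Python) =====
-- _PHRASES = ("reference sequence is identical to", "reference sequence was derived from")
--
--
-- def _hit(sentence):
--     if any(p in sentence for p in _PHRASES):
--         return sentence.rsplit()[-1]
--     return None
--
--
-- def get_refseq_base(comment: str) -> str:
--     frags = [f.strip() for f in comment.replace("\n", " ").split(".")]
--     cur = frags[0]
--     for frag in frags[1:]:
--         if frag.isdigit():
--             cur += "." + frag
--         else:
--             hit = _hit(cur)
--             if hit is not None:
--                 return hit
--             cur = frag
--     hit = _hit(cur)
--     if hit is not None:
--         return hit
--     raise ValueError(f"couldn't get refseq base accession from: {comment}")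
-- ===== Notes on version B (the rewrite author's own statement) =====
-- stated objective: alternative
-- what changed: Single forward pass with one current-sentence accumulator that tests each sentence as soon as it is finalized, instead of first materializing the whole sentence list and then scanning it in a second loop.
import Mathlib
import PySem

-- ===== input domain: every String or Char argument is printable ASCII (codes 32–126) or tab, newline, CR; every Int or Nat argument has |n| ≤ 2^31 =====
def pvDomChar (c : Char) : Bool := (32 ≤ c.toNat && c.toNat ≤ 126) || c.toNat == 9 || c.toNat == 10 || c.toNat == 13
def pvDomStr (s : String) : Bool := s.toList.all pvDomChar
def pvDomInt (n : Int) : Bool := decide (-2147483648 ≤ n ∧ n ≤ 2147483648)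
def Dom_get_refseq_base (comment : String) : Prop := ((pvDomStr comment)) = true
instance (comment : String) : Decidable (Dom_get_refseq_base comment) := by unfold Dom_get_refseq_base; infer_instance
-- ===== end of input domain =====

-- B replaces A's build-the-whole-sentence-list-then-scan two-loop structure by a single
-- forward pass with one current-sentence accumulator tested as each sentence is finalized.

-- the two target phrases, shared text of both Pythons
def pvPhrase1 : List Char := "reference sequence is identical to".toList
def pvPhrase2 : List Char := "reference sequence was derived from".toList

-- the stripped period-split fragments of the newline-normalized comment (first line of both Pythons)
def pvFrags (comment : String) : List (List Char) :=
  ((PySem.Chars.splitOn (PySem.Chars.replace comment.toList "\n".toList " ".toList) ".".toList).map PySem.Chars.strip)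

-- sentence.rsplit()[-1] (total guard: [] where Python's [-1] would raise; unreachable on a match)
def pvLastTok (s : List Char) : List Char :=
  (PySem.List.pyGet? (PySem.Chars.split₀ s) (-1)).getD []

-- ===== PORT A =====
-- the `for i, raw in enumerate(raw_sentences[1:])` loop: mutate last element or append
def pvStepA (acc : List (List Char)) (raw : List Char) : List (List Char) :=
  if PySem.Chars.strIsdigit raw then acc.dropLast ++ [acc.getLastD [] ++ '.' :: raw]
  else acc ++ [raw]

-- the `for sentence in sentences` loop with early return; [] where Python raises ValueError
def pvFindA : List (List Char) → List Char
  | [] => []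
  | s :: ss =>
    if PySem.Chars.isIn pvPhrase1 s || PySem.Chars.isIn pvPhrase2 s then pvLastTok s
    else pvFindA ss

def get_refseq_base (comment : String) : String :=
  let raw_sentences := pvFrags comment
  let sentences := (PySem.List.slice raw_sentences (some 1) none).foldl pvStepA
    (PySem.List.slice raw_sentences none (some 1))
  String.mk (pvFindA sentences)

-- ===== PORT B =====
-- _hit(sentence)
def pvHit (s : List Char) : Option (List Char) :=
  if PySem.Chars.isIn pvPhrase1 s || PySem.Chars.isIn pvPhrase2 s then some (pvLastTok s)
  else none

-- B's single loop: accumulator `cur`, finalize-then-check; none where Python raises ValueError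
def pvLoopB (cur : List Char) : List (List Char) → Option (List Char)
  | [] => pvHit cur
  | f :: rest =>
    if PySem.Chars.strIsdigit f then pvLoopB (cur ++ '.' :: f) rest
    else
      match pvHit cur with
      | some r => some r
      | none => pvLoopB f rest

def get_refseq_base_alt (comment : String) : String :=
  match pvFrags comment with
  | [] => ""          -- unreachable: split never returns an empty list
  | cur :: rest => String.mk ((pvLoopB cur rest).getD [])

-- ===== PRECONDITION & SPEC =====
-- exactly the inputs on which A returns (otherwise it raises ValueError): one of the two
-- phrases occurs in the newline-normalized comment
def Pre_get_refseq_base (comment : String) : Prop :=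
  (PySem.Str.isIn "reference sequence is identical to" (PySem.Str.replace comment "\n" " ") = true)
  ∨ (PySem.Str.isIn "reference sequence was derived from" (PySem.Str.replace comment "\n" " ") = true)
instance (comment : String) : Decidable (Pre_get_refseq_base comment) := by
  unfold Pre_get_refseq_base; infer_instance
def pvWitness_get_refseq_base : String := "The reference sequence is identical to AB123456.1."

def Spec_get_refseq_base (comment : String) (out : String) : Prop := out = get_refseq_base_alt comment
instance (comment : String) (out : String) : Decidable (Spec_get_refseq_base comment out) := by unfold Spec_get_refseq_base; infer_instance

-- ===== CLAIM (what is proved, stated in full; the proofs are below) =====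
def Claim_equal_get_refseq_base : Prop := ∀ (comment : String), Dom_get_refseq_base comment → Pre_get_refseq_base comment → Spec_get_refseq_base comment (get_refseq_base comment)

-- ===== LEMMAS AND PROOFS =====

-- pure sentence builder used only by the proof
def pvSent (cur : List Char) : List (List Char) → List (List Char)
  | [] => [cur]
  | f :: rest =>
    if PySem.Chars.strIsdigit f then pvSent (cur ++ '.' :: f) rest
    else cur :: pvSent f rest

theorem pvFoldA_eq_sent (fs : List (List Char)) :
    ∀ (acc : List (List Char)) (cur : List Char),
      fs.foldl pvStepA (acc ++ [cur]) = acc ++ pvSent cur fs := by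
  induction fs with
  | nil => intro acc cur; simp [pvSent]
  | cons f rest ih =>
    intro acc cur
    simp only [List.foldl, pvStepA, pvSent]
    by_cases h : PySem.Chars.strIsdigit f
    · simp [h, ih acc (cur ++ '.' :: f)]
    · simp only [h, Bool.false_eq_true, if_false]
      rw [show acc ++ [cur] ++ [f] = (acc ++ [cur]) ++ [f] from rfl, ih (acc ++ [cur]) f]
      simp

theorem pvFind_sent_eq_loopB (fs : List (List Char)) :
    ∀ (cur : List Char), pvFindA (pvSent cur fs) = (pvLoopB cur fs).getD [] := by
  induction fs with
  | nil =>
    intro cur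
    simp only [pvSent, pvLoopB, pvFindA, pvHit]
    split <;> simp
  | cons f rest ih =>
    intro cur
    simp only [pvSent, pvLoopB]
    by_cases h : PySem.Chars.strIsdigit f
    · simp [h, ih]
    · simp only [h, Bool.false_eq_true, if_false, pvFindA, pvHit]
      split <;> simp [ih]

theorem pv_eq (comment : String) : get_refseq_base comment = get_refseq_base_alt comment := by
  unfold get_refseq_base get_refseq_base_alt
  cases hf : pvFrags comment with
  | nil =>
    simp only [PySem.List.slice, pvFindA]
    rfl
  | cons cur rest =>
    have h1 : PySem.List.slice (cur :: rest) (some 1) none = rest := by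
      simp [PySem.List.slice_from]
    have h0 : PySem.List.slice (cur :: rest) none (some 1) = [cur] := by
      simp [PySem.List.slice_to]
    simp only [h1, h0]
    rw [show ([cur] : List (List Char)) = [] ++ [cur] from rfl, pvFoldA_eq_sent]
    simp [pvFind_sent_eq_loopB]

-- ===== VERDICT (by name: the statement is the Claim_ definition above) =====
theorem get_refseq_base_spec : Claim_equal_get_refseq_base := by
  intro comment _ _
  unfold Spec_get_refseq_base
  exact pv_eq comment
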